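-- pv_equiv track=rewrite | github.com/mooncfrat2019/skillbox-python-practice-3 | main.py | min_digit
-- ===== SOURCE A (Python) =====
-- def min_digit(number):
--     num = abs(number)
--
--     if num == 0:
--         return 0
--
--     min_digit_value = 9
--
--     while num > 0:
--         digit = num % 10
--         if digit < min_digit_value:
--             min_digit_value = digit
--         num //= 10
--
--     return min_digit_value
-- ===== SOURCE B (Python) =====
-- def min_digit(number):
--     return min(int(c) for c in str(abs(number)))
-- ===== Notes on version B (the rewrite author's own statement) =====
-- stated objective: simpler
-- what changed: Replaces the explicit zero guard and the while-loop extracting digits arithmetically (% 10 // 10, least-significant first, with a seeded accumulator 9) by a one-line min over the characters of str(abs(number)) (most-significant first, no seed, no guard).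
import Mathlib
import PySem

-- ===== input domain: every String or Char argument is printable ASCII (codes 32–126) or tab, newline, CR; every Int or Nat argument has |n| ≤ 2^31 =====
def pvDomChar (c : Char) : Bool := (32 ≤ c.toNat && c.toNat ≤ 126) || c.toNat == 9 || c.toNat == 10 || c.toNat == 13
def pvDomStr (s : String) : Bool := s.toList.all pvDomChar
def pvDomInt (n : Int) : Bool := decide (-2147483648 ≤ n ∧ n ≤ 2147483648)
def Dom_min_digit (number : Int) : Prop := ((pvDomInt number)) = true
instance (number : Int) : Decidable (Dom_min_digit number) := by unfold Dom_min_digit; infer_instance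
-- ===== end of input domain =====

-- B replaces A's zero guard and arithmetic %10 // 10 digit loop by the minimum over the characters of str(abs(number)); simpler, equal behaviour proved.


-- ===== PORT A =====
-- the while loop: num > 0 → take digit = num % 10, update the running minimum, num //= 10
def minDigitLoop (num : Int) (min_digit_value : Int) : Int :=
  if _h : 0 < num then
    let digit := PySem.Int.mod num 10
    minDigitLoop (PySem.Int.floordiv num 10)
      (if digit < min_digit_value then digit else min_digit_value)
  else min_digit_value
termination_by num.toNat
decreasing_by
  rw [PySem.Int.floordiv_eq_ediv_of_pos (by norm_num)]
  have h2 : (0:Int) ≤ num / 10 := Int.ediv_nonneg (le_of_lt _h) (by norm_num)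
  have h3 : num / 10 * 10 ≤ num := Int.ediv_mul_le num (by norm_num)
  omega

def min_digit (number : Int) : Int :=
  let num := |number|
  if num = 0 then 0 else minDigitLoop num 9

-- ===== PORT B =====
-- min(int(c) for c in str(abs(number))).  int(c) on the decimal digit characters that
-- str(abs(number)) produces is exactly c.toNat - 48 (hand port, exact on '0'..'9').
def min_digit_alt (number : Int) : Int :=
  let ds := (PySem.Int.toStr |number|).toList.map (fun c => ((c.toNat : Int) - 48))
  match ds with
  | [] => 0            -- unreachable: str(n) is never empty, Python's min never raises here
  | d :: rest => rest.foldl min d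

-- ===== PRECONDITION & SPEC =====
def Spec_min_digit (number : Int) (out : Int) : Prop := out = min_digit_alt number
instance (number : Int) (out : Int) : Decidable (Spec_min_digit number out) := by unfold Spec_min_digit; infer_instance

-- ===== CLAIM (what is proved, stated in full; the proofs are below) =====
def Claim_equal_min_digit : Prop := ∀ (number : Int), Dom_min_digit number → Spec_min_digit number (min_digit number)

-- ===== LEMMAS AND PROOFS =====

-- Nat.toDigits' worker, characterised by Nat.digits
lemma toDigitsCore_eq_digits (n : Nat) : ∀ (fuel : Nat) (acc : List Char), 1 ≤ n → n ≤ fuel →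
    Nat.toDigitsCore 10 fuel n acc = ((Nat.digits 10 n).map Nat.digitChar).reverse ++ acc := by
  induction n using Nat.strong_induction_on with
  | _ n ih =>
    intro fuel acc h1 h2
    match fuel with
    | 0 => omega
    | fuel + 1 =>
      simp only [Nat.toDigitsCore]
      rw [Nat.digits_def' (by norm_num : (1:Nat) < 10) (by omega : 0 < n)]
      by_cases hz : n / 10 = 0
      · simp [hz]
      · rw [if_neg hz]
        rw [ih (n / 10) (Nat.div_lt_self (by omega) (by norm_num)) fuel _
          (by omega) (by have := Nat.div_lt_self (show 0 < n by omega) (show 1 < 10 by norm_num); omega)]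
        simp

lemma toDigits_eq_digits (n : Nat) (h : 1 ≤ n) :
    Nat.toDigits 10 n = ((Nat.digits 10 n).map Nat.digitChar).reverse := by
  rw [Nat.toDigits, toDigitsCore_eq_digits n (n+1) [] h (by omega), List.append_nil]

lemma digitChar_val (d : Nat) (h : d < 10) : ((Nat.digitChar d).toNat : Int) - 48 = (d : Int) := by
  interval_cases d <;> decide

-- A's loop folds min (seeded) over the least-significant-first digit list
lemma minDigitLoop_eq_foldl (m : Nat) : ∀ (acc : Int),
    minDigitLoop (m : Int) acc = ((Nat.digits 10 m).map (fun (d : Nat) => (d : Int))).foldl min acc := by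
  induction m using Nat.strong_induction_on with
  | _ m ih =>
    intro acc
    rw [minDigitLoop]
    by_cases hm : 0 < m
    · rw [dif_pos (by exact_mod_cast hm)]
      rw [show PySem.Int.mod (m : Int) 10 = ((m % 10 : Nat) : Int) by
            rw [PySem.Int.mod_eq_emod_of_pos (by norm_num)]; norm_cast,
          show PySem.Int.floordiv (m : Int) 10 = ((m / 10 : Nat) : Int) by
            rw [PySem.Int.floordiv_eq_ediv_of_pos (by norm_num)]; norm_cast]
      rw [ih (m / 10) (Nat.div_lt_self hm (by norm_num))]
      rw [Nat.digits_def' (by norm_num : (1:Nat) < 10) hm]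
      simp only [List.map_cons, List.foldl_cons]
      congr 1
      rcases lt_trichotomy ((m % 10 : Nat) : Int) acc with h | h | h
      · rw [if_pos h, min_comm, min_eq_left (le_of_lt h)]
      · rw [if_neg (by omega), min_eq_left (le_of_eq h.symm)]
      · rw [if_neg (by omega), min_eq_left (le_of_lt h)]
    · rw [dif_neg (by exact_mod_cast hm)]
      have h0 : m = 0 := by omega
      simp [h0]

-- absorbing the seed 9 into a nonempty list of digits ≤ 9
lemma foldl_min_nine (x : Int) (xs : List Int) (hx : x ≤ 9) :
    (x :: xs).foldl min 9 = xs.foldl min x := by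
  simp [List.foldl_cons, min_eq_right hx]

lemma foldl_min_reverse (l : List Int) (a : Int) : l.reverse.foldl min a = l.foldl min a := by
  rw [List.foldl_reverse]
  have h : (fun (x y : Int) => min y x) = min := by funext x y; exact min_comm y x
  rw [h]
  exact Eq.symm (List.foldl_eq_foldr a l)

-- ===== VERDICT (by name: the statement is the Claim_ definition above) =====
theorem min_digit_spec : Claim_equal_min_digit := by
  intro number _
  unfold Spec_min_digit min_digit min_digit_alt
  rw [Int.abs_eq_natAbs number]
  generalize number.natAbs = m
  by_cases hz : m = 0
  · subst hz; decide
  · rw [if_neg (by exact_mod_cast hz)]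
    have hlt : ∀ d ∈ Nat.digits 10 m, d < 10 := fun d hd => Nat.digits_lt_base' hd
    -- B's digit list is the reversed (Int-cast) digit list of m
    have hds : (PySem.Int.toStr (m : Int)).toList.map (fun c => ((c.toNat : Int) - 48))
        = ((Nat.digits 10 m).map (fun (d : Nat) => (d : Int))).reverse := by
      rw [PySem.Int.toStr]
      simp only [String.toList_ofList, PySem.Int.toChars]
      rw [if_neg (by omega), Int.toNat_natCast,
        toDigits_eq_digits m (by omega), List.map_reverse, List.map_map]
      exact congrArg List.reverse (List.map_congr_left (fun d hd => digitChar_val d (hlt d hd)))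
    rw [hds]
    -- A's loop = foldl min 9 over the digit list; absorb the 9 and undo the reverse
    rw [minDigitLoop_eq_foldl m 9]
    have hb : ∀ x ∈ (Nat.digits 10 m).map (fun (d : Nat) => (d : Int)), x ≤ 9 := by
      intro x hx
      obtain ⟨d, hd, rfl⟩ := List.mem_map.mp hx
      have := hlt d hd; omega
    rcases hcons : (Nat.digits 10 m).map (fun (d : Nat) => (d : Int)) with _ | ⟨d0, rest⟩
    · exact absurd (List.map_eq_nil_iff.mp hcons) (Nat.digits_ne_nil_iff_ne_zero.mpr hz)
    · have hd0 : d0 ≤ 9 := hb d0 (hcons ▸ List.mem_cons_self) 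
      rw [foldl_min_nine d0 rest hd0]
      have hrev : (d0 :: rest).reverse.foldl min (9:Int) = rest.foldl min d0 := by
        rw [foldl_min_reverse, foldl_min_nine d0 rest hd0]
      rcases hr : (d0 :: rest).reverse with _ | ⟨e0, erest⟩
      · exact absurd (List.reverse_eq_nil_iff.mp hr) (List.cons_ne_nil d0 rest)
      · have he0 : e0 ≤ 9 := by
          have hmem : e0 ∈ (d0 :: rest).reverse := by rw [hr]; exact List.mem_cons_self
          rw [List.mem_reverse] at hmem
          exact hb e0 (hcons ▸ hmem)
        rw [hr, foldl_min_nine e0 erest he0] at hrev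
        exact hrev.symm
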